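-- pv_equiv track=rewrite | github.com/Zaikon13/wallet_monitor_Dex | telegram/dispatcher.py | _parse_tx_args
-- ===== SOURCE A (Python) =====
-- from typing import Callable, Dict, List, Optional
--
-- def _parse_tx_args(args: List[str]) -> tuple[Optional[str], Optional[str]]:
--     symbol = None
--     day = None
--     for arg in args:
--         if arg and any(ch.isdigit() for ch in arg) and "-" in arg:
--             day = arg
--         elif symbol is None:
--             symbol = arg
--     return symbol, day
-- ===== SOURCE B (Python) =====
-- from typing import List, Optional
--
-- def _is_daylike(arg: str) -> bool:
--     return bool(arg) and any(ch.isdigit() for ch in arg) and "-" in arg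
--
-- def _parse_tx_args(args: List[str]) -> tuple[Optional[str], Optional[str]]:
--     symbol = next((a for a in args if not _is_daylike(a)), None)
--     day = next((a for a in reversed(args) if _is_daylike(a)), None)
--     return symbol, day
-- ===== Notes on version B (the rewrite author's own statement) =====
-- stated objective: simpler
-- what changed: Replaces the single accumulating loop with two independent declarative scans: symbol is the first non-day-like argument (forward next), day is the last day-like argument (next over reversed(args)), with the day-like predicate factored into a helper.
import Mathlib
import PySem

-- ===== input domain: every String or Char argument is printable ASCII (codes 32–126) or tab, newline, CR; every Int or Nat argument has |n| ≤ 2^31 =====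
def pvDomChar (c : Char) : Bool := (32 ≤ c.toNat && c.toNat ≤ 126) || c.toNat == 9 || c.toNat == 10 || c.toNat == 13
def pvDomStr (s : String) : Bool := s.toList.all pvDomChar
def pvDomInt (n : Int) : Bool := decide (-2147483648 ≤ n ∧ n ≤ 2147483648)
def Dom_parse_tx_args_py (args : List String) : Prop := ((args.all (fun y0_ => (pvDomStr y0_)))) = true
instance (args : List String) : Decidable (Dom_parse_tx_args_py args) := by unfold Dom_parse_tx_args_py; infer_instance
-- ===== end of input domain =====

-- B replaces A's single accumulating loop by two independent scans (first non-day-like arg forward, last day-like arg over the reversed list); objective: simpler.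

-- ===== PORT A =====
-- A's loop: state (symbol, day), predicate inlined exactly as in A.
def parse_tx_args_py_loop : List String → Option String × Option String → Option String × Option String
  | [], st => st
  | arg :: rest, (symbol, day) =>
    if (decide (arg ≠ "") && arg.toList.any PySem.Chars.isdigit && PySem.Str.isIn "-" arg) = true then
      parse_tx_args_py_loop rest (symbol, some arg)
    else if symbol = none then
      parse_tx_args_py_loop rest (some arg, day)
    else
      parse_tx_args_py_loop rest (symbol, day)

def parse_tx_args_py (args : List String) : Option String × Option String :=
  parse_tx_args_py_loop args (none, none)

-- ===== PORT B =====
-- 'arg and any(ch.isdigit() for ch in arg) and "-" in arg'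
def pvDayLike (a : String) : Bool :=
  decide (a ≠ "") && a.toList.any PySem.Chars.isdigit && PySem.Str.isIn "-" a

def parse_tx_args_py_alt (args : List String) : Option String × Option String :=
  (args.find? (fun a => !pvDayLike a), args.reverse.find? pvDayLike)

-- ===== PRECONDITION & SPEC =====
def Spec_parse_tx_args_py (args : List String) (out : Option String × Option String) : Prop := out = parse_tx_args_py_alt args
instance (args : List String) (out : Option String × Option String) : Decidable (Spec_parse_tx_args_py args out) := by unfold Spec_parse_tx_args_py; infer_instance

-- ===== CLAIM (what is proved, stated in full; the proofs are below) =====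
def Claim_equal_parse_tx_args_py : Prop := ∀ (args : List String), Dom_parse_tx_args_py args → Spec_parse_tx_args_py args (parse_tx_args_py args)

-- ===== LEMMAS AND PROOFS =====

theorem pvCond_eq (a : String) :
    (decide (a ≠ "") && a.toList.any PySem.Chars.isdigit && PySem.Str.isIn "-" a) = pvDayLike a := rfl

theorem parse_tx_args_py_loop_eq (args : List String) (s d : Option String) :
    parse_tx_args_py_loop args (s, d) =
      ((s.orElse fun _ => args.find? (fun a => !pvDayLike a)),
       ((args.reverse.find? pvDayLike).orElse fun _ => d)) := by
  induction args generalizing s d with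
  | nil => cases s <;> simp [parse_tx_args_py_loop, Option.orElse]
  | cons a rest ih =>
    simp only [parse_tx_args_py_loop, pvCond_eq, List.reverse_cons, List.find?_append,
      List.find?_cons]
    by_cases h : pvDayLike a = true
    · rw [if_pos h, ih]
      simp only [h]
      cases hf : List.find? pvDayLike rest.reverse <;>
        simp [Option.orElse]
    · rw [if_neg h]
      have hb : pvDayLike a = false := by simpa using h
      cases s with
      | none =>
        rw [if_pos rfl, ih]
        cases hf : List.find? pvDayLike rest.reverse <;>
          simp [hb, Option.orElse]
      | some x =>
        rw [if_neg (by simp), ih]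
        cases hf : List.find? pvDayLike rest.reverse <;>
          simp [hb, Option.orElse]

-- ===== VERDICT (by name: the statement is the Claim_ definition above) =====
theorem parse_tx_args_py_spec : Claim_equal_parse_tx_args_py := by
  intro args _
  unfold Spec_parse_tx_args_py parse_tx_args_py parse_tx_args_py_alt
  rw [parse_tx_args_py_loop_eq]
  cases hf : List.find? pvDayLike args.reverse <;> simp [Option.orElse]
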